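-- pv_equiv track=rewrite | github.com/epfl-ada/ada-2023-project-adaccident-de-travail | sequel_scraper/sequel_scraper.py | extract_sequel
-- ===== SOURCE A (Python) =====
-- def extract_sequel(html_extract):
--
--     new_sequel = []
--     end_ID = False
--     start_ID = False
--     for i in range(len(html_extract)):
--         if start_ID == False:
--             if html_extract[i] == 'Q':
--                 start_ID = True
--                 new_sequel.append(html_extract[i])
--         elif start_ID == True:
--             if end_ID == False:
--                 if html_extract[i].isdigit() == True:
--                     new_sequel.append(html_extract[i])
--                 else:
--                     break
--     return new_sequel
-- ===== SOURCE B (Python) =====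
-- def extract_sequel(html_extract):
--     # two-phase: partition at the first 'Q', then measure the leading digit
--     # run of the tail via lstrip and slice it off -- no stateful scan.
--     head, sep, tail = html_extract.partition('Q')
--     if not sep:
--         return []
--     digits = tail[:len(tail) - len(tail.lstrip('0123456789'))]
--     return list(sep + digits)
-- ===== Notes on version B (the rewrite author's own statement) =====
-- stated objective: simpler
-- what changed: Replaces the single stateful flag-driven scan (start/end booleans plus break) with a two-phase decomposition: str.partition at the first 'Q', then the leading digit run of the tail obtained by an lstrip length difference and a slice.
import Mathlib
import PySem

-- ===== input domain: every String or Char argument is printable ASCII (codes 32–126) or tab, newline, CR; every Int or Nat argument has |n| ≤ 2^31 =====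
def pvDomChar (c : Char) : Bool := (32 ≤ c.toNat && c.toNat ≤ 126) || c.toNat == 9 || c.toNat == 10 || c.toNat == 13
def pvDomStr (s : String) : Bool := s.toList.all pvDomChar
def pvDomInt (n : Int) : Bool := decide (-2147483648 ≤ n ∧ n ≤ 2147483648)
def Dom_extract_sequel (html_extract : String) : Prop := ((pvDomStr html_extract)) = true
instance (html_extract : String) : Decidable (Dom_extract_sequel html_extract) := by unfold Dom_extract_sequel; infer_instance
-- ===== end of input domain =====

-- B replaces A's stateful flag-driven character scan with a two-phase decomposition
-- (partition at the first 'Q', then slice off the leading digit run measured via lstrip): simpler, same O(n) cost.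


-- ===== PORT A =====
-- A's for-loop over the indices of html_extract, carried as structural recursion over the
-- characters, with A's state: accumulator new_sequel, start_ID, end_ID (A never sets end_ID
-- to true; it is kept in the state to mirror A's code); A's 'break' returns the accumulator.
def extractSequelLoopA : List Char → List String → Bool → Bool → List String
  | [], new_sequel, _, _ => new_sequel
  | c :: rest, new_sequel, start_ID, end_ID =>
    if start_ID = false then
      if c = 'Q' then extractSequelLoopA rest (new_sequel ++ [String.ofList [c]]) true end_ID
      else extractSequelLoopA rest new_sequel start_ID end_ID
    else
      if end_ID = false then
        if PySem.Chars.isdigit c = true then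
          extractSequelLoopA rest (new_sequel ++ [String.ofList [c]]) start_ID end_ID
        else new_sequel   -- break
      else extractSequelLoopA rest new_sequel start_ID end_ID

def extract_sequel (html_extract : String) : List String :=
  extractSequelLoopA html_extract.toList [] false false

-- ===== PORT B =====
-- html_extract.partition('Q') ported by hand (exact): head = the text before the first 'Q';
-- sep is empty iff head is the whole string; tail = the rest after that 'Q'.
-- tail.lstrip('0123456789') ported by hand (exact): dropWhile of membership in the digit chars.
-- list(sep + digits) = the characters of 'Q' followed by digits, as one-character strings.
def extract_sequel_alt (html_extract : String) : List String :=
  let cs := html_extract.toList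
  let head := cs.takeWhile (fun c => c != 'Q')
  if head.length = cs.length then []        -- sep == '' : no 'Q' in the string
  else
    let tail := cs.drop (head.length + 1)
    let digits := tail.take (tail.length - (tail.dropWhile (fun c => "0123456789".toList.contains c)).length)
    ('Q' :: digits).map (fun c => String.ofList [c])

-- ===== PRECONDITION & SPEC =====
def Spec_extract_sequel (html_extract : String) (out : List String) : Prop := out = extract_sequel_alt html_extract
instance (html_extract : String) (out : List String) : Decidable (Spec_extract_sequel html_extract out) := by unfold Spec_extract_sequel; infer_instance

-- ===== CLAIM (what is proved, stated in full; the proofs are below) =====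
def Claim_equal_extract_sequel : Prop := ∀ (html_extract : String), Dom_extract_sequel html_extract → Spec_extract_sequel html_extract (extract_sequel html_extract)

-- ===== LEMMAS AND PROOFS =====

-- B's body as a function of the character list (extract_sequel_alt s = pvAltCore s.toList by rfl).
def pvAltCore (cs : List Char) : List String :=
  let head := cs.takeWhile (fun c => c != 'Q')
  if head.length = cs.length then []
  else
    let tail := cs.drop (head.length + 1)
    let digits := tail.take (tail.length - (tail.dropWhile (fun c => "0123456789".toList.contains c)).length)
    ('Q' :: digits).map (fun c => String.ofList [c])

theorem pv_alt_eq_core (s : String) : extract_sequel_alt s = pvAltCore s.toList := rfl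

-- B's digit test (membership in '0123456789') agrees with A's c.isdigit() on every Char.
theorem pv_digit_pred (c : Char) :
    ("0123456789".toList.contains c) = PySem.Chars.isdigit c := by
  simp only [PySem.Chars.isdigit, show ("0123456789".toList) = ['0','1','2','3','4','5','6','7','8','9'] from rfl,
    List.contains_cons, List.contains_nil, Bool.or_false]
  rw [Bool.eq_iff_iff]
  simp only [Bool.or_eq_true, beq_iff_eq, Char.ext_iff, ← UInt32.toNat_inj, Char.le_def,
    UInt32.le_iff_toNat_le, Bool.and_eq_true, decide_eq_true_eq, Char.reduceVal, UInt32.reduceToNat]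
  omega

-- the lstrip-length slice equals takeWhile.
theorem pv_take_sub_dropWhile (p : Char → Bool) (l : List Char) :
    l.take (l.length - (l.dropWhile p).length) = l.takeWhile p := by
  have hlen : (l.takeWhile p).length + (l.dropWhile p).length = l.length := by
    have := congrArg List.length (List.takeWhile_append_dropWhile (p := p) (l := l))
    simp only [List.length_append] at this
    exact this
  rw [show l.length - (l.dropWhile p).length = (l.takeWhile p).length by omega]
  exact (List.prefix_iff_eq_take.mp (List.takeWhile_prefix p)).symm

theorem pv_altCore_cons_Q (cs : List Char) :
    pvAltCore ('Q' :: cs) =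
      "Q" :: (cs.takeWhile (fun c => PySem.Chars.isdigit c)).map (fun c => String.ofList [c]) := by
  have hpred : (fun c => "0123456789".toList.contains c) = (fun c => PySem.Chars.isdigit c) :=
    funext fun c => pv_digit_pred c
  unfold pvAltCore
  rw [hpred]
  simp [pv_take_sub_dropWhile]

theorem pv_altCore_cons_ne (c : Char) (cs : List Char) (h : ¬ c = 'Q') :
    pvAltCore (c :: cs) = pvAltCore cs := by
  simp only [pvAltCore, List.takeWhile_cons, bne_iff_ne, ne_eq, h, not_false_eq_true, if_true,
    List.length_cons]
  by_cases hlen : (cs.takeWhile (fun c => c != 'Q')).length = cs.length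
  · simp [hlen]
  · have h1 : ¬ ((cs.takeWhile (fun c => c != 'Q')).length + 1 = cs.length + 1) := by omega
    simp only [hlen, if_false, h1]
    rfl

-- once started (start_ID = true, end_ID = false), A appends exactly the leading digit run.
theorem pv_loopA_started (cs : List Char) (acc : List String) :
    extractSequelLoopA cs acc true false =
      acc ++ (cs.takeWhile (fun c => PySem.Chars.isdigit c)).map (fun c => String.ofList [c]) := by
  induction cs generalizing acc with
  | nil => simp [extractSequelLoopA]
  | cons c rest ih =>
    by_cases hd : PySem.Chars.isdigit c = true
    · simp [extractSequelLoopA, hd, ih]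
    · simp [extractSequelLoopA, hd]

theorem pv_loopA_eq_core (cs : List Char) :
    extractSequelLoopA cs [] false false = pvAltCore cs := by
  induction cs with
  | nil => simp [extractSequelLoopA, pvAltCore]
  | cons c rest ih =>
    by_cases hq : c = 'Q'
    · subst hq
      simp [extractSequelLoopA, pv_loopA_started, pv_altCore_cons_Q]
    · simp [extractSequelLoopA, hq, ih, pv_altCore_cons_ne c rest hq]

-- ===== VERDICT (by name: the statement is the Claim_ definition above) =====
theorem extract_sequel_spec : Claim_equal_extract_sequel := by
  intro s _
  unfold Spec_extract_sequel extract_sequel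
  rw [pv_alt_eq_core, pv_loopA_eq_core]
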